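-- pv_equiv track=rewrite | github.com/seondays/codingtest-python | DMOJ/COCI '13 Contest 2 #2 Misa.py | handshake_counting
-- ===== SOURCE A (Python) =====
-- def handshake_counting(maxtrix,row,column):
--     count = 0
--
--     for i in range(1,row+1):
--         for j in range(1,column+1):
--             if maxtrix[i][j] == 'o':
--                 if maxtrix[i-1][j-1] == 'o':
--                     count += 1
--                 if maxtrix[i-1][j] == 'o':
--                     count += 1
--                 if maxtrix[i-1][j+1] == 'o':
--                     count += 1
--                 if maxtrix[i][j-1] == 'o':
--                     count += 1
--                 if maxtrix[i][j+1] == 'o':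
--                     count += 1
--                 if maxtrix[i+1][j-1] == 'o':
--                     count += 1
--                 if maxtrix[i+1][j] == 'o':
--                     count += 1
--                 if maxtrix[i+1][j+1] == 'o':
--                     count += 1
--     return count // 2
-- ===== SOURCE B (Python) =====
-- def handshake_counting(maxtrix, row, column):
--     total = 0
--     # stage 1: horizontal 'o'-'o' pairs inside each scanned row
--     for i in range(1, row + 1):
--         total += sum(maxtrix[i][j] == 'o' == maxtrix[i][j + 1]
--                      for j in range(1, column))
--     # stage 2: pairs between each scanned row and the row below it
--     for i in range(1, row):
--         for j in range(1, column + 1):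
--             if maxtrix[i][j] == 'o':
--                 total += ((maxtrix[i + 1][j - 1] == 'o')
--                           + (maxtrix[i + 1][j] == 'o')
--                           + (maxtrix[i + 1][j + 1] == 'o'))
--     return total
-- ===== Notes on version B (the rewrite author's own statement) =====
-- stated objective: alternative
-- what changed: B replaces A's per-cell 8-neighbor count halved by //2 with two staged pair-oriented passes: one pass counting horizontal 'o'-'o' pairs inside each row, and one pass over consecutive row pairs counting vertical and diagonal pairs, so every adjacent pair is produced exactly once and no division is needed.
import Mathlib
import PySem

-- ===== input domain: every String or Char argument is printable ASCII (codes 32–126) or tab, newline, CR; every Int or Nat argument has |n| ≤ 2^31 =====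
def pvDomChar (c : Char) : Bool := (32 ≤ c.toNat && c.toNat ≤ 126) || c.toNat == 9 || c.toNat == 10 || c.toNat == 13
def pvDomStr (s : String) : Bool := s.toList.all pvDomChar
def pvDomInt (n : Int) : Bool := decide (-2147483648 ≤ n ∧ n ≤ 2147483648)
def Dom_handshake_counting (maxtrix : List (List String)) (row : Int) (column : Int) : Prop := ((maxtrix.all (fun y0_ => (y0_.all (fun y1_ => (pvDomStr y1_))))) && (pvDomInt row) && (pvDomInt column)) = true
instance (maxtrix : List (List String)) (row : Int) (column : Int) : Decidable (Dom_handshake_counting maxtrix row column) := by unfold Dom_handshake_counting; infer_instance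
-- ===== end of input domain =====

-- B counts adjacent 'o' pairs directly in two staged passes (horizontal pairs within
-- each row, then vertical/diagonal pairs between consecutive rows) instead of A's
-- per-cell 8-neighbor double count halved by //2 (objective: alternative).


-- maxtrix[i][j] for 0 ≤ i, j (the only indices the loops produce); out-of-range reads
-- (excluded by Pre_) fall back to "" here where Python would raise.
def pvCell (maxtrix : List (List String)) (i j : Int) : String :=
  (PySem.List.pyGet? ((PySem.List.pyGet? maxtrix i).getD []) j).getD ""

-- ===== PORT A =====
def handshake_counting (maxtrix : List (List String)) (row : Int) (column : Int) : Int :=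
  let count : Int :=
    (PySem.List.pyRange 1 (row + 1) 1).foldl (fun count i =>
      (PySem.List.pyRange 1 (column + 1) 1).foldl (fun count j =>
        if pvCell maxtrix i j = "o" then
          let count := if pvCell maxtrix (i-1) (j-1) = "o" then count + 1 else count
          let count := if pvCell maxtrix (i-1) j = "o" then count + 1 else count
          let count := if pvCell maxtrix (i-1) (j+1) = "o" then count + 1 else count
          let count := if pvCell maxtrix i (j-1) = "o" then count + 1 else count
          let count := if pvCell maxtrix i (j+1) = "o" then count + 1 else count
          let count := if pvCell maxtrix (i+1) (j-1) = "o" then count + 1 else count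
          let count := if pvCell maxtrix (i+1) j = "o" then count + 1 else count
          if pvCell maxtrix (i+1) (j+1) = "o" then count + 1 else count
        else count) count) 0
  PySem.Int.floordiv count 2

-- ===== PORT B =====
-- stage 1: horizontal 'o'-'o' pairs inside each scanned row (a sum over range(1, column));
-- stage 2: for each pair of consecutive scanned rows, vertical and both diagonal pairs.
def handshake_counting_alt (maxtrix : List (List String)) (row : Int) (column : Int) : Int :=
  let total : Int :=
    (PySem.List.pyRange 1 (row + 1) 1).foldl (fun total i =>
      total + ((PySem.List.pyRange 1 column 1).map (fun j =>
        if pvCell maxtrix i j = "o" ∧ pvCell maxtrix i (j+1) = "o" then (1:Int) else 0)).sum) 0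
  (PySem.List.pyRange 1 row 1).foldl (fun total i =>
    (PySem.List.pyRange 1 (column + 1) 1).foldl (fun total j =>
      if pvCell maxtrix i j = "o" then
        total + ((if pvCell maxtrix (i+1) (j-1) = "o" then (1:Int) else 0) +
                 (if pvCell maxtrix (i+1) j = "o" then 1 else 0) +
                 (if pvCell maxtrix (i+1) (j+1) = "o" then 1 else 0))
      else total) total) total

-- ===== PRECONDITION & SPEC =====
-- Pre_ admits every degenerate call (row < 1 or column < 1: both loops run empty) and,
-- otherwise, the problem's padded rectangular grids; it additionally requires the padding
-- ring (row 0, row row+1, and columns 0 and column+1 of the scanned rows) to hold no "o" —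
-- on grids with "o" in the ring A's once-counted border adjacencies floored by //2 and B's
-- pair passes that never look into the ring's corners are both accidental readings of an
-- improperly padded input, so those inputs are excluded.
def Pre_handshake_counting (maxtrix : List (List String)) (row : Int) (column : Int) : Prop :=
  row < 1 ∨ column < 1 ∨
  (row + 2 ≤ (maxtrix.length : Int) ∧
   (∀ r ∈ maxtrix, column + 2 ≤ (r.length : Int)) ∧
   (∀ j ∈ PySem.List.pyRange 0 (column + 2) 1,
      pvCell maxtrix 0 j ≠ "o" ∧ pvCell maxtrix (row + 1) j ≠ "o") ∧
   (∀ i ∈ PySem.List.pyRange 1 (row + 1) 1,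
      pvCell maxtrix i 0 ≠ "o" ∧ pvCell maxtrix i (column + 1) ≠ "o"))
instance (maxtrix : List (List String)) (row : Int) (column : Int) : Decidable (Pre_handshake_counting maxtrix row column) := by unfold Pre_handshake_counting; infer_instance

def pvWitness_handshake_counting : List (List String) × Int × Int :=
  ([[".", ".", ".", "."], [".", "o", "o", "."], [".", ".", ".", "."]], 1, 2)

def Spec_handshake_counting (maxtrix : List (List String)) (row : Int) (column : Int) (out : Int) : Prop := out = handshake_counting_alt maxtrix row column
instance (maxtrix : List (List String)) (row : Int) (column : Int) (out : Int) : Decidable (Spec_handshake_counting maxtrix row column out) := by unfold Spec_handshake_counting; infer_instance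

-- ===== CLAIM (what is proved, stated in full; the proofs are below) =====
def Claim_equal_handshake_counting : Prop := ∀ (maxtrix : List (List String)) (row : Int) (column : Int), Dom_handshake_counting maxtrix row column → Pre_handshake_counting maxtrix row column → Spec_handshake_counting maxtrix row column (handshake_counting maxtrix row column)

-- ===== LEMMAS AND PROOFS =====

-- 0/1 indicator of an 'o' cell
def pvInd (m : List (List String)) (i j : Int) : Int := if pvCell m i j = "o" then 1 else 0

-- per-cell contribution of A's inner-loop body
def pvGA (m : List (List String)) (i j : Int) : Int :=
  pvInd m i j * (pvInd m (i-1) (j-1) + pvInd m (i-1) j + pvInd m (i-1) (j+1) +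
    pvInd m i (j-1) + pvInd m i (j+1) +
    pvInd m (i+1) (j-1) + pvInd m (i+1) j + pvInd m (i+1) (j+1))

-- per-term contribution of B's horizontal pass
def pvGH (m : List (List String)) (i j : Int) : Int := pvInd m i j * pvInd m i (j+1)

-- per-cell contribution of B's between-rows pass
def pvGV (m : List (List String)) (i j : Int) : Int :=
  pvInd m i j * (pvInd m (i+1) (j-1) + pvInd m (i+1) j + pvInd m (i+1) (j+1))

lemma pvStep (P : Prop) [Decidable P] (c : Int) :
    (if P then c + 1 else c) = c + (if P then (1:Int) else 0) := by split <;> simp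

lemma pvBodyA (m : List (List String)) (i j c : Int) :
    (if pvCell m i j = "o" then
      let count := if pvCell m (i-1) (j-1) = "o" then c + 1 else c
      let count := if pvCell m (i-1) j = "o" then count + 1 else count
      let count := if pvCell m (i-1) (j+1) = "o" then count + 1 else count
      let count := if pvCell m i (j-1) = "o" then count + 1 else count
      let count := if pvCell m i (j+1) = "o" then count + 1 else count
      let count := if pvCell m (i+1) (j-1) = "o" then count + 1 else count
      let count := if pvCell m (i+1) j = "o" then count + 1 else count
      if pvCell m (i+1) (j+1) = "o" then count + 1 else count
    else c) = c + pvGA m i j := by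
  by_cases h : pvCell m i j = "o"
  · simp only [pvGA, pvInd, pvStep, if_pos h]; ring
  · simp only [pvGA, pvInd, pvStep, if_neg h]; ring

lemma pvPair (m : List (List String)) (i j : Int) :
    (if pvCell m i j = "o" ∧ pvCell m i (j+1) = "o" then (1:Int) else 0) = pvGH m i j := by
  simp only [pvGH, pvInd]; split_ifs with h h1 h2 <;> simp_all

lemma pvBodyB (m : List (List String)) (i j c : Int) :
    (if pvCell m i j = "o" then
      c + ((if pvCell m (i+1) (j-1) = "o" then (1:Int) else 0) +
           (if pvCell m (i+1) j = "o" then 1 else 0) +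
           (if pvCell m (i+1) (j+1) = "o" then 1 else 0))
    else c) = c + pvGV m i j := by
  by_cases h : pvCell m i j = "o"
  · simp only [pvGV, pvInd, if_pos h]; ring
  · simp only [pvGV, pvInd, if_neg h]; ring

-- list-range sum = Finset.range sum
lemma pvListFinset (h : Nat -> Int) (n : Nat) :
    ((List.range n).map h).sum = Finset.sum (Finset.range n) h := by
  induction n with
  | zero => simp
  | succ n ih =>
    rw [List.range_succ, List.map_append, List.sum_append, Finset.sum_range_succ, ih]; simp

-- sum over pyRange(1, n+1) = sum over Finset.Icc 1 n
lemma pvRangeIcc (g : Int -> Int) (n : Int) :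
    ((PySem.List.pyRange 1 (n + 1) 1).map g).sum = Finset.sum (Finset.Icc (1:Int) n) g := by
  rw [PySem.List.pyRange_one, List.map_map, pvListFinset]
  refine Finset.sum_nbij' (fun k => 1 + (k : Int)) (fun i => (i - 1).toNat) ?_ ?_ ?_ ?_ ?_
  · intro a ha; simp only [Finset.mem_range] at ha; simp only [Finset.mem_Icc]; omega
  · intro a ha; simp only [Finset.mem_Icc] at ha; simp only [Finset.mem_range]; omega
  · intro a _; show (1 + (a:Int) - 1).toNat = a; omega
  · intro a ha; simp only [Finset.mem_Icc] at ha; show 1 + (((a - 1).toNat : Nat) : Int) = a; omega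
  · intro a _; simp [Function.comp]

-- sum over pyRange(1, n) = sum over Finset.Icc 1 (n-1)
lemma pvRangeIcc' (g : Int -> Int) (n : Int) :
    ((PySem.List.pyRange 1 n 1).map g).sum = Finset.sum (Finset.Icc (1:Int) (n - 1)) g := by
  have h := pvRangeIcc g (n - 1)
  rw [sub_add_cancel] at h
  exact h

-- drop the last index of a sum whose last term is zero
lemma pvDropLast (g : Int -> Int) (n : Int) (h : g n = 0) :
    Finset.sum (Finset.Icc (1:Int) (n - 1)) g = Finset.sum (Finset.Icc (1:Int) n) g := by
  apply Finset.sum_subset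
  · intro x hx; simp only [Finset.mem_Icc] at *; omega
  · intro x hx hx'
    simp only [Finset.mem_Icc] at hx hx'
    have : x = n := by omega
    subst this; exact h

-- with a zero ring around the box, a backward-shifted pair sum equals the forward one
lemma pvShift (f : Int × Int -> Int) (R C a b : Int)
    (ha : -1 <= a ∧ a <= 1) (hb : -1 <= b ∧ b <= 1)
    (h0 : ∀ p : Int × Int, 0 <= p.1 -> p.1 <= R + 1 -> 0 <= p.2 -> p.2 <= C + 1 ->
      ¬(1 <= p.1 ∧ p.1 <= R ∧ 1 <= p.2 ∧ p.2 <= C) -> f p = 0) :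
    (∑ p ∈ Finset.Icc (1:Int) R ×ˢ Finset.Icc (1:Int) C, f p * f (p.1 + a, p.2 + b)) =
    (∑ p ∈ Finset.Icc (1:Int) R ×ˢ Finset.Icc (1:Int) C, f p * f (p.1 - a, p.2 - b)) := by
  have hbox : ∀ p : Int × Int, p ∈ Finset.Icc (1:Int) R ×ˢ Finset.Icc (1:Int) C ↔
      (1 <= p.1 ∧ p.1 <= R ∧ 1 <= p.2 ∧ p.2 <= C) := by
    intro p; simp only [Finset.mem_product, Finset.mem_Icc]; tauto
  have hL : (∑ p ∈ (Finset.Icc (1:Int) R ×ˢ Finset.Icc (1:Int) C).filter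
      (fun p => (p.1 + a, p.2 + b) ∈ Finset.Icc (1:Int) R ×ˢ Finset.Icc (1:Int) C),
      f p * f (p.1 + a, p.2 + b)) =
      ∑ p ∈ Finset.Icc (1:Int) R ×ˢ Finset.Icc (1:Int) C, f p * f (p.1 + a, p.2 + b) := by
    apply Finset.sum_filter_of_ne
    intro p hp hne
    have hp' := (hbox p).1 hp
    rw [hbox]
    try dsimp only
    by_contra hnot
    apply hne
    have hz : f (p.1 + a, p.2 + b) = 0 := by
      apply h0 (p.1 + a, p.2 + b) <;> (try dsimp only) <;> omega
    rw [hz, mul_zero]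
  have hR : (∑ p ∈ (Finset.Icc (1:Int) R ×ˢ Finset.Icc (1:Int) C).filter
      (fun p => (p.1 - a, p.2 - b) ∈ Finset.Icc (1:Int) R ×ˢ Finset.Icc (1:Int) C),
      f p * f (p.1 - a, p.2 - b)) =
      ∑ p ∈ Finset.Icc (1:Int) R ×ˢ Finset.Icc (1:Int) C, f p * f (p.1 - a, p.2 - b) := by
    apply Finset.sum_filter_of_ne
    intro p hp hne
    have hp' := (hbox p).1 hp
    rw [hbox]
    try dsimp only
    by_contra hnot
    apply hne
    have hz : f (p.1 - a, p.2 - b) = 0 := by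
      apply h0 (p.1 - a, p.2 - b) <;> (try dsimp only) <;> omega
    rw [hz, mul_zero]
  rw [← hL, ← hR]
  refine Finset.sum_nbij' (fun p => (p.1 + a, p.2 + b)) (fun p => (p.1 - a, p.2 - b)) ?_ ?_ ?_ ?_ ?_
  · intro p hp
    simp only [Finset.mem_filter, hbox] at hp ⊢
    try dsimp only at hp ⊢
    omega
  · intro p hp
    simp only [Finset.mem_filter, hbox] at hp ⊢
    try dsimp only at hp ⊢
    omega
  · intro p _; obtain ⟨x, y⟩ := p; simp
  · intro p _; obtain ⟨x, y⟩ := p; simp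
  · intro p _
    obtain ⟨x, y⟩ := p
    dsimp only
    rw [show x + a - a = x by ring, show y + b - b = y by ring]
    ring

-- pvShift specialised to the indicator function
lemma pvShiftInd (m : List (List String)) (R C a b : Int)
    (ha : -1 <= a ∧ a <= 1) (hb : -1 <= b ∧ b <= 1)
    (h0 : ∀ p : Int × Int, 0 <= p.1 -> p.1 <= R + 1 -> 0 <= p.2 -> p.2 <= C + 1 ->
      ¬(1 <= p.1 ∧ p.1 <= R ∧ 1 <= p.2 ∧ p.2 <= C) -> pvInd m p.1 p.2 = 0) :
    (∑ p ∈ Finset.Icc (1:Int) R ×ˢ Finset.Icc (1:Int) C, pvInd m p.1 p.2 * pvInd m (p.1 + a) (p.2 + b)) =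
    (∑ p ∈ Finset.Icc (1:Int) R ×ˢ Finset.Icc (1:Int) C, pvInd m p.1 p.2 * pvInd m (p.1 - a) (p.2 - b)) := by
  have h := pvShift (fun p => pvInd m p.1 p.2) R C a b ha hb h0
  simpa using h

lemma pvHalf (x y z w : Int) :
    PySem.Int.floordiv (w + z + y + x + x + y + z + w) 2 = x + y + z + w := by
  rw [show w + z + y + x + x + y + z + w = (x + y + z + w) * 2 by ring,
      PySem.Int.floordiv_eq_ediv_of_pos (by norm_num), Int.mul_ediv_cancel _ (by norm_num)]

-- ===== VERDICT (by name: the statement is the Claim_ definition above) =====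
theorem handshake_counting_spec : Claim_equal_handshake_counting := by
  intro m row column _ hpre
  unfold Spec_handshake_counting handshake_counting handshake_counting_alt
  simp only [pvBodyA, pvBodyB, pvPair, PySem.List.foldl_add, zero_add, pvRangeIcc',
    add_sub_cancel_right]
  by_cases h : row < 1
  · rw [Finset.Icc_eq_empty (show ¬(1:Int) <= row by omega),
        Finset.Icc_eq_empty (show ¬(1:Int) <= row - 1 by omega)]
    simp only [Finset.sum_empty]
    decide
  by_cases h2 : column < 1
  · have hc : ∀ i : Int, Finset.sum (Finset.Icc (1:Int) column) (fun j => pvGA m i j) = 0 := by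
      intro i; rw [Finset.Icc_eq_empty (show ¬(1:Int) <= column by omega)]; simp
    have hc1 : ∀ i : Int, Finset.sum (Finset.Icc (1:Int) (column - 1)) (fun j => pvGH m i j) = 0 := by
      intro i; rw [Finset.Icc_eq_empty (show ¬(1:Int) <= column - 1 by omega)]; simp
    have hc2 : ∀ i : Int, Finset.sum (Finset.Icc (1:Int) column) (fun j => pvGV m i j) = 0 := by
      intro i; rw [Finset.Icc_eq_empty (show ¬(1:Int) <= column by omega)]; simp
    simp only [hc, hc1, hc2, Finset.sum_const_zero, add_zero]
    decide
  rcases hpre with hbad | hbad | ⟨_, _, hring1, hring2⟩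
  · exact (h hbad).elim
  · exact (h2 hbad).elim
  · have h0 : ∀ p : Int × Int, 0 <= p.1 -> p.1 <= row + 1 -> 0 <= p.2 -> p.2 <= column + 1 ->
        ¬(1 <= p.1 ∧ p.1 <= row ∧ 1 <= p.2 ∧ p.2 <= column) -> pvInd m p.1 p.2 = 0 := by
      rintro ⟨i, j⟩ h1 h2 h3 h4 h5
      try dsimp only at h1 h2 h3 h4 h5
      have hno : pvCell m i j ≠ "o" := by
        rcases (show i = 0 ∨ i = row + 1 ∨ (1 <= i ∧ i <= row) by omega) with rfl | rfl | hio
        · exact (hring1 j (by rw [PySem.List.mem_pyRange_one]; omega)).1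
        · exact (hring1 j (by rw [PySem.List.mem_pyRange_one]; omega)).2
        · rcases (show j = 0 ∨ j = column + 1 by omega) with rfl | rfl
          · exact (hring2 i (by rw [PySem.List.mem_pyRange_one]; omega)).1
          · exact (hring2 i (by rw [PySem.List.mem_pyRange_one]; omega)).2
      simp [pvInd, hno]
    -- B's horizontal pass: restore the dropped j = column term (it is zero)
    have hH : (∑ i ∈ Finset.Icc (1:Int) row, ∑ j ∈ Finset.Icc (1:Int) (column - 1), pvGH m i j) =
        ∑ i ∈ Finset.Icc (1:Int) row, ∑ j ∈ Finset.Icc (1:Int) column, pvGH m i j := by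
      apply Finset.sum_congr rfl
      intro i hi
      simp only [Finset.mem_Icc] at hi
      apply pvDropLast
      have hz : pvInd m i (column + 1) = 0 :=
        h0 (i, column + 1) (by omega) (by omega) (by omega) (by omega) (by dsimp only; omega)
      simp only [pvGH]
      rw [hz, mul_zero]
    -- B's between-rows pass: restore the dropped i = row row (it is zero)
    have hV : (∑ i ∈ Finset.Icc (1:Int) (row - 1), ∑ j ∈ Finset.Icc (1:Int) column, pvGV m i j) =
        ∑ i ∈ Finset.Icc (1:Int) row, ∑ j ∈ Finset.Icc (1:Int) column, pvGV m i j := by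
      apply pvDropLast
      apply Finset.sum_eq_zero
      intro j hj
      simp only [Finset.mem_Icc] at hj
      have z1 : pvInd m (row + 1) (j - 1) = 0 :=
        h0 (row + 1, j - 1) (by omega) (by omega) (by omega) (by omega) (by dsimp only; omega)
      have z2 : pvInd m (row + 1) j = 0 :=
        h0 (row + 1, j) (by omega) (by omega) (by omega) (by omega) (by dsimp only; omega)
      have z3 : pvInd m (row + 1) (j + 1) = 0 :=
        h0 (row + 1, j + 1) (by omega) (by omega) (by omega) (by omega) (by dsimp only; omega)
      simp only [pvGV]
      rw [z1, z2, z3]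
      ring
    rw [hH, hV]
    -- shift lemmas: A's four backward directions equal its four forward ones
    have e1 : (∑ p ∈ Finset.Icc (1:Int) row ×ˢ Finset.Icc (1:Int) column,
        pvInd m p.1 p.2 * pvInd m (p.1 - 1) (p.2 - 1)) =
        ∑ p ∈ Finset.Icc (1:Int) row ×ˢ Finset.Icc (1:Int) column,
        pvInd m p.1 p.2 * pvInd m (p.1 + 1) (p.2 + 1) :=
      (pvShiftInd m row column 1 1 (by norm_num) (by norm_num) h0).symm
    have e2 : (∑ p ∈ Finset.Icc (1:Int) row ×ˢ Finset.Icc (1:Int) column,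
        pvInd m p.1 p.2 * pvInd m (p.1 - 1) p.2) =
        ∑ p ∈ Finset.Icc (1:Int) row ×ˢ Finset.Icc (1:Int) column,
        pvInd m p.1 p.2 * pvInd m (p.1 + 1) p.2 := by
      have h := (pvShiftInd m row column 1 0 (by norm_num) (by norm_num) h0).symm
      simpa only [add_zero, sub_zero] using h
    have e3 : (∑ p ∈ Finset.Icc (1:Int) row ×ˢ Finset.Icc (1:Int) column,
        pvInd m p.1 p.2 * pvInd m (p.1 - 1) (p.2 + 1)) =
        ∑ p ∈ Finset.Icc (1:Int) row ×ˢ Finset.Icc (1:Int) column,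
        pvInd m p.1 p.2 * pvInd m (p.1 + 1) (p.2 - 1) := by
      have h := (pvShiftInd m row column 1 (-1) (by norm_num) (by norm_num) h0).symm
      simpa only [sub_neg_eq_add, ← sub_eq_add_neg] using h
    have e4 : (∑ p ∈ Finset.Icc (1:Int) row ×ˢ Finset.Icc (1:Int) column,
        pvInd m p.1 p.2 * pvInd m p.1 (p.2 - 1)) =
        ∑ p ∈ Finset.Icc (1:Int) row ×ˢ Finset.Icc (1:Int) column,
        pvInd m p.1 p.2 * pvInd m p.1 (p.2 + 1) := by
      have h := (pvShiftInd m row column 0 1 (by norm_num) (by norm_num) h0).symm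
      simpa only [add_zero, sub_zero] using h
    rw [← Finset.sum_product', ← Finset.sum_product', ← Finset.sum_product']
    simp only [pvGA, pvGH, pvGV, mul_add, Finset.sum_add_distrib]
    rw [e1, e2, e3, e4]
    rw [pvHalf]
    ring
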